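-- pv_equiv track=rewrite | github.com/Omar9832/codepath-intermediate-interview-prep | General/Home Practice.py | max_audience_performances
-- ===== SOURCE A (Python) =====
-- def max_audience_performances(audiences):
--     i=0
--     max=audiences[i]
--     while i<len(audiences):
--         if audiences[i]>max:
--             max=audiences[i]
--         i=i+1
--
--     return audiences.count(max)*max
-- ===== SOURCE B (Python) =====
-- def max_audience_performances(audiences):
--     max = audiences[0]
--     count = 0
--     for x in audiences:
--         if x > max:
--             max = x
--             count = 1
--         elif x == max:
--             count += 1
--     return count * max
-- ===== Notes on version B (the rewrite author's own statement) =====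
-- stated objective: alternative
-- what changed: B fuses A's two passes (index loop to find the max, then a separate list.count pass) into one traversal maintaining both the running maximum and its occurrence count.
import Mathlib
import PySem

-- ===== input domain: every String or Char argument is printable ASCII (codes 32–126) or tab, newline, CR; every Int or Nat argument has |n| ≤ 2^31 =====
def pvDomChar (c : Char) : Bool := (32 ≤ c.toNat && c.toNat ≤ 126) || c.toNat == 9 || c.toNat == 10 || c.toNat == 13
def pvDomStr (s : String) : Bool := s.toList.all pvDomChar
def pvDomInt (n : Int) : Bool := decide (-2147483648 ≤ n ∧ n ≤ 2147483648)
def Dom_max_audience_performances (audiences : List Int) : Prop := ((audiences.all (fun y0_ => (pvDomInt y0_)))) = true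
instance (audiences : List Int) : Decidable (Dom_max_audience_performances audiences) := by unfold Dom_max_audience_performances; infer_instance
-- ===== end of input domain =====

-- B fuses A's find-max index loop and separate .count pass into one traversal
-- maintaining the running maximum and its occurrence count.
-- ===== PORT A =====
-- the 'while i < len(audiences)' loop: scans the remaining elements, updating max
def pvALoop : List Int → Int → Int
  | [], mx => mx
  | x :: xs, mx => pvALoop xs (if x > mx then x else mx)

def max_audience_performances (audiences : List Int) : Int :=
  let mx0 := (PySem.List.pyGet? audiences 0).getD 0   -- the initial subscript; none (IndexError) excluded by Pre_
  let mx := pvALoop audiences mx0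
  ((PySem.List.count audiences mx : Int)) * mx

-- ===== PORT B =====
-- the 'for x in audiences' loop of Source B: running maximum mx and its count c
def pvBLoop : List Int → Int → Int → Int
  | [], mx, c => c * mx
  | x :: xs, mx, c =>
      if x > mx then pvBLoop xs x 1
      else if x == mx then pvBLoop xs mx (c + 1)
      else pvBLoop xs mx c

def max_audience_performances_alt (audiences : List Int) : Int :=
  match audiences with
  | [] => 0            -- Source B raises IndexError here on its initial subscript; excluded by Pre_
  | x :: _ => pvBLoop audiences x 0

-- ===== PRECONDITION & SPEC =====
-- Pre_ excludes exactly the empty list, on which both Pythons raise IndexError at the initial element access.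
def Pre_max_audience_performances (audiences : List Int) : Prop := audiences ≠ []
instance (audiences : List Int) : Decidable (Pre_max_audience_performances audiences) := by unfold Pre_max_audience_performances; infer_instance
def pvWitness_max_audience_performances : List Int := [3, 1, 3, 2]
def Spec_max_audience_performances (audiences : List Int) (out : Int) : Prop := out = max_audience_performances_alt audiences
instance (audiences : List Int) (out : Int) : Decidable (Spec_max_audience_performances audiences out) := by unfold Spec_max_audience_performances; infer_instance

-- ===== CLAIM (what is proved, stated in full; the proofs are below) =====
def Claim_equal_max_audience_performances : Prop := ∀ (audiences : List Int), Dom_max_audience_performances audiences → Pre_max_audience_performances audiences → Spec_max_audience_performances audiences (max_audience_performances audiences)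

-- ===== LEMMAS AND PROOFS =====

theorem pvALoop_le (l : List Int) (mx : Int) : mx ≤ pvALoop l mx := by
  induction l generalizing mx with
  | nil => simp [pvALoop]
  | cons x xs ih =>
    simp only [pvALoop]
    split
    · exact le_trans (by omega) (ih x)
    · exact ih mx

-- loop invariant: B's fused loop computes (count of the final max in the rest,
-- plus the carried count if mx survives as the max) times the final max
theorem pvBLoop_eq (l : List Int) (mx c : Int) :
    pvBLoop l mx c =
      ((List.count (pvALoop l mx) l : Int) +
        if mx = pvALoop l mx then c else 0) * pvALoop l mx := by
  induction l generalizing mx c with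
  | nil => simp [pvBLoop, pvALoop]
  | cons x xs ih =>
    by_cases hx : x > mx
    · rw [show pvBLoop (x :: xs) mx c = pvBLoop xs x 1 from by simp [pvBLoop, hx],
        show pvALoop (x :: xs) mx = pvALoop xs x from by simp [pvALoop, hx],
        ih x 1, List.count_cons]
      have hM := pvALoop_le xs x
      rw [if_neg (show ¬ mx = pvALoop xs x by omega)]
      by_cases hxM : x = pvALoop xs x
      · rw [if_pos hxM, if_pos (beq_iff_eq.mpr hxM)]
        push_cast; ring
      · rw [if_neg hxM, if_neg (fun h => hxM (beq_iff_eq.mp h))]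
        push_cast; ring
    · have hA : pvALoop (x :: xs) mx = pvALoop xs mx := by simp [pvALoop, hx]
      by_cases hxe : x = mx
      · rw [show pvBLoop (x :: xs) mx c = pvBLoop xs mx (c + 1) from by
            simp [pvBLoop, hxe],
          hA, ih, List.count_cons]
        by_cases hM : mx = pvALoop xs mx
        · rw [if_pos hM, if_pos hM,
            if_pos (beq_iff_eq.mpr (show x = pvALoop xs mx by omega))]
          push_cast; ring
        · rw [if_neg hM, if_neg hM,
            if_neg (show ¬ (x == pvALoop xs mx) = true from fun h => by
              have := beq_iff_eq.mp h; omega)]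
          push_cast; ring
      · have hlt : x < mx := by omega
        rw [show pvBLoop (x :: xs) mx c = pvBLoop xs mx c from by
            simp [pvBLoop, hx, hxe],
          hA, ih, List.count_cons]
        have hM := pvALoop_le xs mx
        rw [if_neg (show ¬ (x == pvALoop xs mx) = true from fun h => by
          have := beq_iff_eq.mp h; omega)]
        push_cast; ring

-- ===== VERDICT (by name: the statement is the Claim_ definition above) =====
theorem max_audience_performances_spec : Claim_equal_max_audience_performances := by
  intro audiences _ hpre
  unfold Spec_max_audience_performances
  match audiences, hpre with
  | x :: xs, _ =>
    simp only [max_audience_performances, max_audience_performances_alt,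
      PySem.List.pyGet?, PySem.List.count_eq]
    rw [pvBLoop_eq]
    simp [PySem.List.pyIdx?, ite_self]
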